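-- pv_equiv track=rewrite | github.com/entuland/fogibot | command/perm.py | findPosition
-- ===== SOURCE A (Python) =====
-- def findPosition(s):
--     i = 0
--     pos = -1
--     f = firstPermutation(s)
--     while f != False:
--         if f == s:
--             pos = i
--         f = nextPermutation(f)
--         i += 1
--     return pos, i # i = total permutations
--
-- def firstPermutation(s):
--     return "".join(sorted(s))
--
-- def nextPermutation(s):
--     s = list(s)
--     length = len(s)
--
--     if not length:
--         return false
--
--     k = length - 2
--     while k >= 0 and s[k] >= s[k+1]:
--         k -= 1
--
--     if k < 0:
--         return False
--
--     j = length - 1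
--     while s[k] >= s[j]:
--         j -= 1
--
--     s[k], s[j] = s[j], s[k]
--
--     return "".join(s[:k+1] + s[k+1:][::-1])
-- ===== SOURCE B (Python) =====
-- def findPosition(s):
--     # Generate all distinct permutations in lexicographic order by recursive
--     # choice of the first character; rank = count of permutations below s.
--     perms = _gen(_sortchars(s))
--     pos = 0
--     for p in perms:
--         if p < s:
--             pos += 1
--     return pos, len(perms)
--
-- def _sortchars(s):
--     # insertion sort of the characters of s (ascending)
--     out = []
--     for c in s:
--         i = 0
--         while i < len(out) and out[i] <= c:
--             i += 1
--         out.insert(i, c)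
--     return out
--
-- def _gen(chars):
--     # chars: sorted list of characters; returns sorted distinct permutations
--     if not chars:
--         return [""]
--     out = []
--     for c in _dedup(chars):
--         for t in _gen(_remove_one(chars, c)):
--             out.append(c + t)
--     return out
--
-- def _dedup(chars):
--     seen = []
--     for c in chars:
--         if c not in seen:
--             seen.append(c)
--     return seen
--
-- def _remove_one(chars, c):
--     i = chars.index(c)
--     return chars[:i] + chars[i+1:]
-- ===== Notes on version B (the rewrite author's own statement) =====
-- stated objective: alternative
-- what changed: A repeatedly applies an index-scanning next-permutation successor to walk through all distinct permutations; B instead generates the sorted list of distinct permutations directly by recursive choice of the first character and obtains the rank by counting the generated permutations lexicographically below s.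
import Mathlib
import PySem

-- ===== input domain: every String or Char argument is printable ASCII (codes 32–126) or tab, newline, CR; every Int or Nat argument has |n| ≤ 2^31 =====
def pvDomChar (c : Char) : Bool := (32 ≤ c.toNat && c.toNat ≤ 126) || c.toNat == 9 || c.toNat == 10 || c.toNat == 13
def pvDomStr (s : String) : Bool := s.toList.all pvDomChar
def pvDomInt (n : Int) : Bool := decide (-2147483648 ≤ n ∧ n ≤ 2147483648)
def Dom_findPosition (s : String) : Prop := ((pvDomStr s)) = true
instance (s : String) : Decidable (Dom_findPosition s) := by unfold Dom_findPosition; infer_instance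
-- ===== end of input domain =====

-- B replaces A's repeated next-permutation walk by directly generating the sorted list of
-- distinct permutations (recursive first-character choice) and counting those below s (alternative).


-- ===== PORT A =====
-- Python string comparison f < g (used by B's 'p < s' and by the termination measure);
-- exact lexicographic comparison on code points.
def lexLt : List Char → List Char → Bool
  | [], [] => false
  | [], _ :: _ => true
  | _ :: _, [] => false
  | a :: as, b :: bs => if a < b then true else if b < a then false else lexLt as bs

-- 'while k >= 0 and s[k] >= s[k+1]: k -= 1' ; argument m stands for k+1 (0 encodes k = -1);
-- all indices touched are in range, so getD is exact.
def kScan (s : List Char) : Nat → Nat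
  | 0 => 0
  | k + 1 => if s.getD (k + 1) ' ' ≤ s.getD k ' ' then kScan s k else k + 1

-- 'j = length - 1; while s[k] >= s[j]: j -= 1' with a = s[k]; the scan provably stops at j ≥ k+1 ≥ 1,
-- so the 0 base case is never reached on the inputs nextP feeds it.
def jScan (s : List Char) (a : Char) : Nat → Nat
  | 0 => 0
  | j + 1 => if s.getD (j + 1) ' ' ≤ a then jScan s a j else j + 1

-- nextPermutation; none = Python's False. (On the empty string Python hits the misspelled
-- 'false' and raises NameError; that input is excluded by Pre_ and never reached from it.)
def nextP (l : List Char) : Option (List Char) :=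
  let n := l.length
  if n = 0 then none
  else
    let k1 := kScan l (n - 1)
    if k1 = 0 then none
    else
      let k := k1 - 1
      let a := l.getD k ' '
      let j := jScan l a (n - 1)
      let b := l.getD j ' '
      let l2 := (l.set k b).set j a
      some (l2.take (k + 1) ++ (l2.drop (k + 1)).reverse)

-- lemmas the port needs for termination of its while-loop --
theorem kScan_pos (l : List Char) (m r : Nat) (h : kScan l m = r + 1) :
    r + 1 ≤ m ∧ l.getD r ' ' < l.getD (r + 1) ' ' ∧
      (∀ i, r < i → i < m → l.getD (i + 1) ' ' ≤ l.getD i ' ') := by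
  induction m with
  | zero => simp [kScan] at h
  | succ m ih =>
    rw [kScan] at h
    split at h
    · rename_i hc
      obtain ⟨h1, h2, h3⟩ := ih h
      refine ⟨Nat.le_succ_of_le h1, h2, fun i hi1 hi2 => ?_⟩
      rcases Nat.lt_or_ge i m with hlt | hge
      · exact h3 i hi1 hlt
      · have hi : i = m := by omega
        subst hi; exact hc
    · rename_i hc
      obtain rfl : m = r := by omega
      exact ⟨Nat.le_refl _, lt_of_not_ge hc, fun i h1 h2 => by omega⟩

theorem jScan_ge (l : List Char) (a : Char) (t m : Nat) (ht : t ≤ m) (ha : a < l.getD t ' ') :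
    t ≤ jScan l a m ∧ a < l.getD (jScan l a m) ' ' ∧ jScan l a m ≤ m := by
  induction m with
  | zero =>
    obtain rfl : t = 0 := by omega
    exact ⟨Nat.le_refl _, ha, Nat.le_refl _⟩
  | succ m ih =>
    rw [jScan]
    split
    · rename_i hc
      have ht' : t ≤ m := by
        rcases Nat.lt_or_ge t (m + 1) with h | h
        · omega
        · exfalso
          have : t = m + 1 := by omega
          subst this
          exact absurd hc (not_le_of_gt ha)
      obtain ⟨h1, h2, h3⟩ := ih ht'
      exact ⟨h1, h2, Nat.le_succ_of_le h3⟩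
    · rename_i hc
      exact ⟨ht, lt_of_not_ge hc, Nat.le_refl _⟩

theorem setAt (P R : List Char) (x y : Char) : (P ++ x :: R).set P.length y = P ++ y :: R := by
  induction P with
  | nil => rfl
  | cons p ps ih => simpa using ih

theorem takeAt (P R : List Char) (x : Char) : (P ++ x :: R).take (P.length + 1) = P ++ [x] := by
  induction P with
  | nil => rfl
  | cons p ps ih => simpa using ih

theorem dropAt (P R : List Char) (x : Char) : (P ++ x :: R).drop (P.length + 1) = R := by
  induction P with
  | nil => rfl
  | cons p ps ih => simpa using ih

-- the decomposition computed by one nextPermutation step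
theorem nextP_eq (l g : List Char) (h : nextP l = some g) :
    ∃ P M S a b, l = P ++ a :: (M ++ b :: S) ∧ a < b ∧
      g = P ++ b :: (S.reverse ++ a :: M.reverse) := by
  simp only [nextP] at h
  by_cases h0 : l.length = 0
  · rw [if_pos h0] at h; exact absurd h (by simp)
  rw [if_neg h0] at h
  rcases hr : kScan l (l.length - 1) with _ | r
  · rw [hr, if_pos rfl] at h; exact absurd h (by simp)
  rw [hr, if_neg (Nat.succ_ne_zero r)] at h
  simp only [Nat.add_sub_cancel, Option.some.injEq] at h
  obtain ⟨hr1, hr2, -⟩ := kScan_pos l (l.length - 1) r hr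
  obtain ⟨hj1, hj2, hj3⟩ :=
    jScan_ge l (l.getD r ' ') (r + 1) (l.length - 1) hr1 hr2
  set j := jScan l (l.getD r ' ') (l.length - 1) with hjdef
  have hrlen : r < l.length := by omega
  have hjlen : j < l.length := by omega
  set a := l.getD r ' ' with hadef
  set b := l.getD j ' ' with hbdef
  set P := l.take r with hPdef
  set M := (l.drop (r + 1)).take (j - (r + 1)) with hMdef
  set S := l.drop (j + 1) with hSdef
  have hP : P.length = r := by simp [hPdef]; omega
  have hM : M.length = j - (r + 1) := by
    simp [hMdef]; omega
  have e4 : l.drop j = b :: S := by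
    rw [hbdef, List.getD_eq_getElem l ' ' hjlen, hSdef]
    exact List.drop_eq_getElem_cons hjlen
  have e3 : l.drop (r + 1) = M ++ b :: S := by
    conv_lhs => rw [← List.take_append_drop (j - (r + 1)) (l.drop (r + 1))]
    rw [← hMdef, List.drop_drop]
    congr 1
    rw [show r + 1 + (j - (r + 1)) = j by omega]
    exact e4
  have hl : l = P ++ a :: (M ++ b :: S) := by
    conv_lhs => rw [← List.take_append_drop r l]
    rw [← hPdef]
    congr 1
    rw [hadef, List.getD_eq_getElem l ' ' hrlen, ← e3]
    exact List.drop_eq_getElem_cons hrlen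
  have hab : a < b := hj2
  have hset1 : l.set r b = P ++ b :: (M ++ b :: S) := by
    conv_lhs => rw [hl, ← hP]
    exact setAt P (M ++ b :: S) a b
  have hset2 : (l.set r b).set j a = P ++ b :: (M ++ a :: S) := by
    rw [hset1]
    have h2 : (P ++ b :: M).length = j := by
      simp only [List.length_append, List.length_cons, hP, hM]; omega
    have hre : P ++ b :: (M ++ b :: S) = (P ++ b :: M) ++ b :: S := by simp
    rw [hre, ← h2, setAt (P ++ b :: M) S b a]
    simp
  rw [hset2] at h
  refine ⟨P, M, S, a, b, hl, hab, ?_⟩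
  rw [← h, ← hP, takeAt P (M ++ a :: S) b, dropAt P (M ++ a :: S) b]
  simp

theorem lexLt_append (P X Y : List Char) (a b : Char) (hab : a < b) :
    lexLt (P ++ a :: X) (P ++ b :: Y) = true := by
  induction P with
  | nil => simp [lexLt, hab]
  | cons p ps ih => simp [lexLt, ih]

theorem lexLt_cons_iff (a b : Char) (as bs : List Char) :
    lexLt (a :: as) (b :: bs) = true ↔ a < b ∨ (a = b ∧ lexLt as bs = true) := by
  simp only [lexLt]
  split_ifs with h1 h2
  · simp [h1]
  · constructor
    · intro h; simp at h
    · rintro (h | ⟨rfl, h⟩)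
      · exact absurd h h1
      · exact absurd h2 (lt_irrefl a)
  · have hab : a = b := le_antisymm (not_lt.mp h2) (not_lt.mp h1)
    subst hab
    simp

theorem lexLt_trans (x y z : List Char) (h1 : lexLt x y = true) (h2 : lexLt y z = true) :
    lexLt x z = true := by
  induction x generalizing y z with
  | nil =>
    cases y with
    | nil => simp [lexLt] at h1
    | cons b bs =>
      cases z with
      | nil => simp [lexLt] at h2
      | cons c cs => simp [lexLt]
  | cons a as ih =>
    cases y with
    | nil => simp [lexLt] at h1
    | cons b bs =>
      cases z with
      | nil => simp [lexLt] at h2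
      | cons c cs =>
        rw [lexLt_cons_iff] at h1 h2 ⊢
        rcases h1 with hab | ⟨rfl, h1⟩
        · rcases h2 with hbc | ⟨rfl, h2⟩
          · exact Or.inl (lt_trans hab hbc)
          · exact Or.inl hab
        · rcases h2 with hbc | ⟨rfl, h2⟩
          · exact Or.inl hbc
          · exact Or.inr ⟨rfl, ih bs cs h1 h2⟩

theorem lexLt_irrefl (x : List Char) : lexLt x x = false := by
  induction x with
  | nil => rfl
  | cons a as ih => simp [lexLt, ih]

theorem nextP_perm (l g : List Char) (h : nextP l = some g) : l.Perm g := by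
  obtain ⟨P, M, S, a, b, hl, hab, hg⟩ := nextP_eq l g h
  rw [hl, hg]
  refine List.Perm.append_left P ?_
  rw [List.perm_iff_count]
  intro c
  simp only [List.count_cons, List.count_append, List.count_reverse]
  split_ifs <;> omega

theorem nextP_lexLt (l g : List Char) (h : nextP l = some g) : lexLt l g = true := by
  obtain ⟨P, M, S, a, b, hl, hab, hg⟩ := nextP_eq l g h
  rw [hl, hg]
  exact lexLt_append P (M ++ b :: S) (S.reverse ++ a :: M.reverse) a b hab

-- termination measure: number of distinct permutations lexicographically above f
def mu (f : List Char) : Nat := ((f.permutations.dedup).filter (fun t => lexLt f t)).length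

theorem mu_lt (f g : List Char) (h : nextP f = some g) : mu g < mu f := by
  have hperm : f.Perm g := nextP_perm f g h
  have hlex : lexLt f g = true := nextP_lexLt f g h
  have hpp : g.permutations.Perm f.permutations := (hperm.symm).permutations
  have hd : g.permutations.dedup.Perm f.permutations.dedup := hpp.dedup
  have hmu : mu g = ((f.permutations.dedup).filter (fun t => lexLt g t)).length := by
    unfold mu
    exact (hd.filter _).length_eq
  rw [hmu]
  unfold mu
  have hgmem : g ∈ f.permutations.dedup := by
    rw [List.mem_dedup, List.mem_permutations]
    exact hperm.symm
  have hnd : (g :: (f.permutations.dedup).filter (fun t => lexLt g t)).Nodup := by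
    refine List.Nodup.cons ?_ ((List.nodup_dedup f.permutations).filter _)
    intro hmem
    have h2 : lexLt g g = true := List.of_mem_filter hmem
    rw [lexLt_irrefl] at h2
    exact absurd h2 (by simp)
  have hsub : (g :: (f.permutations.dedup).filter (fun t => lexLt g t)) ⊆
      (f.permutations.dedup).filter (fun t => lexLt f t) := by
    intro t ht
    rcases List.mem_cons.mp ht with rfl | ht
    · exact List.mem_filter.mpr ⟨hgmem, hlex⟩
    · obtain ⟨ht1, ht2⟩ := List.mem_filter.mp ht
      exact List.mem_filter.mpr ⟨ht1, lexLt_trans f g t hlex ht2⟩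
  have := (List.subperm_of_subset hnd hsub).length_le
  simpa using this

-- the while-loop of findPosition
def loopA (f : List Char) (i pos : Int) (tgt : List Char) : Int × Int :=
  let pos' := if f = tgt then i else pos
  match h : nextP f with
  | none => (pos', i + 1)
  | some g => loopA g (i + 1) pos' tgt
termination_by mu f
decreasing_by exact mu_lt f g h

def findPosition (s : String) : Int × Int :=
  loopA (PySem.List.sorted s.toList (fun c => c) false) 0 (-1) s.toList

-- ===== PORT B =====
-- insert c before the first element greater than c (the while/insert loop of _sortchars)
def insSorted : List Char → Char → List Char
  | [], c => [c]
  | x :: xs, c => if x ≤ c then x :: insSorted xs c else c :: x :: xs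

def sortchars (l : List Char) : List Char := l.foldl insSorted []

-- _dedup: first-occurrence dedup via a 'seen' accumulator
def dedupF (l : List Char) : List Char := l.foldl (fun seen c => if c ∈ seen then seen else seen ++ [c]) []

-- _remove_one: drop the first occurrence of c (only called with c present and the list nonempty)
def removeOne : List Char → Char → List Char
  | [], _ => []
  | x :: xs, c => if x = c then xs else x :: removeOne xs c

-- termination facts gen cites
theorem dedupF_go_mem (l : List Char) (seen : List Char) (c : Char)
    (h : c ∈ l.foldl (fun seen c => if c ∈ seen then seen else seen ++ [c]) seen) :
    c ∈ seen ∨ c ∈ l := by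
  induction l generalizing seen with
  | nil => exact Or.inl h
  | cons x xs ih =>
    simp only [List.foldl_cons] at h
    rcases ih _ h with hs | hx
    · split_ifs at hs with hmem
      · exact Or.inl hs
      · rcases List.mem_append.mp hs with hs | hs
        · exact Or.inl hs
        · simp at hs; subst hs; simp
    · simp [hx]

theorem mem_of_mem_dedupF (l : List Char) (c : Char) (h : c ∈ dedupF l) : c ∈ l := by
  rcases dedupF_go_mem l [] c h with hs | hl
  · simp at hs
  · exact hl

theorem length_removeOne_lt (l : List Char) (c : Char) (h : c ∈ l) :
    (removeOne l c).length < l.length := by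
  induction l with
  | nil => simp at h
  | cons x xs ih =>
    rw [removeOne]
    split_ifs with hx
    · simp
    · have : c ∈ xs := by
        rcases List.mem_cons.mp h with h1 | h1
        · exact absurd h1.symm hx
        · exact h1
      simpa using ih this

-- _gen: all distinct permutations of the sorted character list, in lexicographic order
def gen (chars : List Char) : List (List Char) :=
  if h : chars = [] then [[]]
  else (dedupF chars).attach.flatMap
    (fun cc => (gen (removeOne chars cc.1)).map (cc.1 :: ·))
termination_by chars.length
decreasing_by exact length_removeOne_lt chars cc.1 (mem_of_mem_dedupF chars cc.1 cc.2)

def findPosition_alt (s : String) : Int × Int :=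
  let tgt := s.toList
  let perms := gen (sortchars tgt)
  (perms.foldl (fun pos p => if lexLt p tgt then pos + 1 else pos) 0, (perms.length : Int))

-- ===== PRECONDITION & SPEC =====
-- Pre_ excludes only the empty string, on which A raises NameError (the misspelled 'false').
def Pre_findPosition (s : String) : Prop := s ≠ ""
instance (s : String) : Decidable (Pre_findPosition s) := by unfold Pre_findPosition; infer_instance
def pvWitness_findPosition : String := "ab"

def Spec_findPosition (s : String) (out : Int × Int) : Prop := out = findPosition_alt s
instance (s : String) (out : Int × Int) : Decidable (Spec_findPosition s out) := by unfold Spec_findPosition; infer_instance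

-- ===== CLAIM (what is proved, stated in full; the proofs are below) =====
def Claim_equal_findPosition : Prop := ∀ (s : String), Dom_findPosition s → Pre_findPosition s → Spec_findPosition s (findPosition s)

-- ===== LEMMAS AND PROOFS =====

theorem gen_nil : gen [] = [[]] := by rw [gen]; rfl

-- the sequence of permutations visited by A's while-loop, starting at f
def chain (f : List Char) : List (List Char) :=
  match h : nextP f with
  | none => [f]
  | some g => f :: chain g
termination_by mu f
decreasing_by exact mu_lt f g h

theorem chain_none (f : List Char) (h : nextP f = none) : chain f = [f] := by
  rw [chain, h]

theorem chain_some (f g : List Char) (h : nextP f = some g) : chain f = f :: chain g := by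
  rw [chain, h]

theorem chain_ge (f : List Char) : ∀ x ∈ chain f, x = f ∨ lexLt f x = true := by
  induction f using chain.induct with
  | case1 f h =>
    rw [chain_none f h]
    intro x hx
    simp at hx
    exact Or.inl hx
  | case2 f g h ih =>
    rw [chain_some f g h]
    intro x hx
    rcases List.mem_cons.mp hx with rfl | hx
    · exact Or.inl rfl
    · rcases ih x hx with rfl | hlt
      · exact Or.inr (nextP_lexLt f x h)
      · exact Or.inr (lexLt_trans f g x (nextP_lexLt f g h) hlt)

theorem chain_pairwise (f : List Char) : (chain f).Pairwise (fun x y => lexLt x y = true) := by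
  induction f using chain.induct with
  | case1 f h => rw [chain_none f h]; simp
  | case2 f g h ih =>
    rw [chain_some f g h]
    refine List.Pairwise.cons ?_ ih
    intro x hx
    rcases chain_ge g x hx with rfl | hlt
    · exact nextP_lexLt f x h
    · exact lexLt_trans f g x (nextP_lexLt f g h) hlt

theorem chain_perm (f : List Char) : ∀ x ∈ chain f, x.Perm f := by
  induction f using chain.induct with
  | case1 f h =>
    rw [chain_none f h]
    intro x hx; simp at hx; simp [hx]
  | case2 f g h ih =>
    rw [chain_some f g h]
    intro x hx
    rcases List.mem_cons.mp hx with rfl | hx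
    · exact List.Perm.refl x
    · exact (ih x hx).trans (nextP_perm f g h).symm

theorem chain_ne_nil (f : List Char) : chain f ≠ [] := by
  rw [chain]
  split <;> simp

theorem not_mem_chain_of_next (f g : List Char) (h : nextP f = some g) : f ∉ chain g := by
  intro hmem
  have hfg := nextP_lexLt f g h
  rcases chain_ge g f hmem with rfl | hlt
  · rw [lexLt_irrefl] at hfg; exact absurd hfg (by simp)
  · have := lexLt_trans f g f hfg hlt
    rw [lexLt_irrefl] at this; exact absurd this (by simp)

theorem loopA_none (f : List Char) (i pos : Int) (tgt : List Char) (h : nextP f = none) :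
    loopA f i pos tgt = (if f = tgt then i else pos, i + 1) := by
  rw [loopA, h]

theorem loopA_some (f g : List Char) (i pos : Int) (tgt : List Char) (h : nextP f = some g) :
    loopA f i pos tgt = loopA g (i + 1) (if f = tgt then i else pos) tgt := by
  rw [loopA, h]

-- A's while-loop, described by the chain it walks
theorem loopA_chain (f : List Char) : ∀ (i pos : Int) (tgt : List Char),
    loopA f i pos tgt =
      (if tgt ∈ chain f then i + ((chain f).idxOf tgt : Int) else pos,
       i + ((chain f).length : Int)) := by
  induction f using chain.induct with
  | case1 f h =>
    intro i pos tgt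
    rw [loopA_none f i pos tgt h, chain_none f h]
    by_cases hft : f = tgt
    · subst hft
      simp [List.idxOf_cons_self]
    · simp [hft, Ne.symm hft]
  | case2 f g h ih =>
    intro i pos tgt
    rw [loopA_some f g i pos tgt h, chain_some f g h]
    by_cases hft : f = tgt
    · subst hft
      have htg : f ∉ chain g := not_mem_chain_of_next f g h
      rw [if_pos rfl, ih (i + 1) i f]
      simp only [htg, if_false, List.mem_cons, true_or, if_true, List.idxOf_cons_self,
        List.length_cons, Prod.mk.injEq]
      push_cast
      omega
    · rw [if_neg hft, ih (i + 1) pos tgt]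
      by_cases hmem : tgt ∈ chain g
      · simp only [hmem, if_true, List.mem_cons, or_true, if_true]
        rw [List.idxOf_cons_ne _ (by exact hft)]
        simp only [Prod.mk.injEq, List.length_cons]
        push_cast
        omega
      · have : ¬ (tgt ∈ f :: chain g) := by
          simp [hmem, Ne.symm hft]
        rw [if_neg hmem, if_neg this]
        simp only [List.length_cons, Prod.mk.injEq]
        refine ⟨trivial, ?_⟩
        push_cast
        omega

theorem kScan_eq_zero (l : List Char) (m : Nat)
    (h : ∀ i, i < m → l.getD (i + 1) ' ' ≤ l.getD i ' ') : kScan l m = 0 := by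
  induction m with
  | zero => rfl
  | succ m ih =>
    rw [kScan, if_pos (h m (Nat.lt_succ_self m))]
    exact ih (fun i hi => h i (Nat.lt_succ_of_lt hi))

theorem kScan_eq_pos (l : List Char) (m r : Nat) (hrm : r < m)
    (hasc : l.getD r ' ' < l.getD (r + 1) ' ')
    (hall : ∀ i, r < i → i < m → l.getD (i + 1) ' ' ≤ l.getD i ' ') : kScan l m = r + 1 := by
  induction m with
  | zero => omega
  | succ m ih =>
    rcases Nat.lt_or_ge r m with hlt | hge
    · rw [kScan, if_pos (hall m hlt (Nat.lt_succ_self m))]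
      exact ih hlt (fun i h1 h2 => hall i h1 (Nat.lt_succ_of_lt h2))
    · have : r = m := by omega
      subst this
      rw [kScan, if_neg (not_le_of_gt hasc)]

theorem jScan_eq (l : List Char) (a : Char) (m j : Nat) (hjm : j ≤ m)
    (hj : a < l.getD j ' ')
    (hall : ∀ i, j < i → i ≤ m → l.getD i ' ' ≤ a) : jScan l a m = j := by
  induction m with
  | zero =>
    obtain rfl : j = 0 := by omega
    rfl
  | succ m ih =>
    rcases Nat.lt_or_ge j (m + 1) with hlt | hge
    · rw [jScan, if_pos (hall (m + 1) hlt (Nat.le_refl _))]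
      exact ih (by omega) (fun i h1 h2 => hall i h1 (Nat.le_succ_of_le h2))
    · have : j = m + 1 := by omega
      subst this
      rw [jScan, if_neg (not_le_of_gt hj)]

theorem kShift (c : Char) (u : List Char) (m : Nat) :
    kScan (c :: u) (m + 1) =
      if kScan u m = 0 then (if u.getD 0 ' ' ≤ c then 0 else 1) else kScan u m + 1 := by
  induction m with
  | zero => simp [kScan]
  | succ m ih =>
    rw [kScan]
    simp only [List.getD_cons_succ]
    by_cases hc : u.getD (m + 1) ' ' ≤ u.getD m ' '
    · rw [if_pos hc, ih]
      conv_rhs => rw [kScan, if_pos hc]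
    · rw [if_neg hc]
      conv_rhs => rw [kScan, if_neg hc]
      simp

theorem jShift (c : Char) (u : List Char) (a : Char) (m : Nat) :
    jScan (c :: u) a (m + 1) =
      if jScan u a m = 0 then (if u.getD 0 ' ' ≤ a then 0 else 1) else jScan u a m + 1 := by
  induction m with
  | zero => simp [jScan]
  | succ m ih =>
    rw [jScan]
    simp only [List.getD_cons_succ]
    by_cases hc : u.getD (m + 1) ' ' ≤ a
    · rw [if_pos hc, ih]
      conv_rhs => rw [jScan, if_pos hc]
    · rw [if_neg hc]
      conv_rhs => rw [jScan, if_neg hc]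
      simp

-- successor step commutes with a fixed first character
theorem nextP_cons (u v : List Char) (c : Char) (h : nextP u = some v) :
    nextP (c :: u) = some (c :: v) := by
  have hu : u ≠ [] := by
    intro h0; subst h0; simp [nextP] at h
  have hlen : 1 ≤ u.length := by
    cases u
    · exact absurd rfl hu
    · simp
  simp only [nextP] at h ⊢
  rw [if_neg (by omega)] at h
  rcases hr : kScan u (u.length - 1) with _ | r
  · rw [hr, if_pos rfl] at h; exact absurd h (by simp)
  rw [hr, if_neg (Nat.succ_ne_zero r)] at h
  simp only [Nat.add_sub_cancel, Option.some.injEq] at h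
  obtain ⟨hr1, hr2, -⟩ := kScan_pos u (u.length - 1) r hr
  obtain ⟨hj1, hj2, hj3⟩ := jScan_ge u (u.getD r ' ') (r + 1) (u.length - 1) hr1 hr2
  rw [if_neg (by simp)]
  have hlen2 : (c :: u).length - 1 = (u.length - 1) + 1 := by
    simp only [List.length_cons]
    omega
  rw [hlen2, kShift c u (u.length - 1), hr, if_neg (Nat.succ_ne_zero r)]
  rw [if_neg (Nat.succ_ne_zero (r + 1))]
  simp only [Nat.add_sub_cancel, List.getD_cons_succ]
  rw [jShift c u (u.getD r ' ') (u.length - 1), if_neg (by omega)]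
  simp only [List.getD_cons_succ, List.set_cons_succ, List.take_succ_cons, List.drop_succ_cons]
  rw [List.cons_append, h]

theorem kScan_zero (l : List Char) (m : Nat) (h : kScan l m = 0) :
    ∀ i, i < m → l.getD (i + 1) ' ' ≤ l.getD i ' ' := by
  induction m with
  | zero => intro i hi; omega
  | succ m ih =>
    rw [kScan] at h
    split_ifs at h with hc
    · intro i hi
      rcases Nat.lt_or_ge i m with hlt | hge
      · exact ih h i hlt
      · have : i = m := by omega
        subst this; exact hc

theorem nextP_none_of_desc (l : List Char) (h : l.Pairwise (fun x y => y ≤ x)) :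
    nextP l = none := by
  simp only [nextP]
  by_cases h0 : l.length = 0
  · rw [if_pos h0]
  · rw [if_neg h0]
    have hk : kScan l (l.length - 1) = 0 := by
      apply kScan_eq_zero
      intro i hi
      have h1 : i + 1 < l.length := by omega
      have h2 : i < l.length := by omega
      rw [List.getD_eq_getElem l ' ' h1, List.getD_eq_getElem l ' ' h2]
      exact List.pairwise_iff_getElem.mp h i (i + 1) h2 h1 (Nat.lt_succ_self i)
    rw [hk, if_pos rfl]

theorem desc_of_nextP_none (l : List Char) (h : nextP l = none) :
    l.Pairwise (fun x y => y ≤ x) := by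
  by_cases h0 : l.length = 0
  · rw [List.length_eq_zero_iff] at h0
    subst h0; exact List.Pairwise.nil
  simp only [nextP] at h
  rw [if_neg h0] at h
  rcases hr : kScan l (l.length - 1) with _ | r
  swap
  · rw [hr, if_neg (Nat.succ_ne_zero r)] at h
    exact absurd h (by simp)
  have hadj := kScan_zero l (l.length - 1) hr
  rw [List.pairwise_iff_getElem]

  have hstep : ∀ i, ∀ hi : i + 1 < l.length, l[i + 1]'hi ≤ l[i]'(by omega) := by
    intro i hi
    have h2 : i < l.length := by omega
    have := hadj i (by omega)
    rwa [List.getD_eq_getElem l ' ' hi, List.getD_eq_getElem l ' ' h2] at this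
  intro i j hi hj hij
  clear h hr hadj
  induction j with
  | zero => omega
  | succ j ihj =>
    rcases Nat.lt_or_ge i j with hlt | hge
    · exact le_trans (hstep j hj) (ihj (by omega) hlt)
    · have : i = j := by omega
      subst this
      exact hstep i hj

theorem getD_at (P : List Char) (x : Char) (R : List Char) :
    (P ++ x :: R).getD P.length ' ' = x := by
  induction P with
  | nil => rfl
  | cons p ps ih => simpa using ih

theorem getD_far (P : List Char) (x : Char) (R : List Char) (i : Nat) :
    (P ++ x :: R).getD (P.length + 1 + i) ' ' = R.getD i ' ' := by
  induction P with
  | nil =>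
    show (x :: R).getD (0 + 1 + i) ' ' = R.getD i ' '
    rw [show 0 + 1 + i = i + 1 by omega]
    exact List.getD_cons_succ
  | cons p ps ih =>
    show (p :: (ps ++ x :: R)).getD (ps.length + 1 + 1 + i) ' ' = R.getD i ' '
    rw [show ps.length + 1 + 1 + i = (ps.length + 1 + i) + 1 by omega]
    rw [List.getD_cons_succ]
    exact ih

-- the jump from the last permutation of one first-character block to the next block
theorem nextP_block (c b : Char) (W T : List Char)
    (hcb : c < b)
    (hW : ∀ x ∈ W, c < x)
    (hT : ∀ x ∈ T, x ≤ c)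
    (hdesc : (W ++ b :: T).Pairwise (fun x y => y ≤ x)) :
    nextP (c :: (W ++ b :: T)) = some (b :: (T.reverse ++ c :: W.reverse)) := by
  set u := W ++ b :: T with hu
  have hulen : u.length = W.length + T.length + 1 := by simp [hu]; omega
  have hlen : (c :: u).length - 1 = u.length := by simp
  have hu0 : c < u.getD 0 ' ' := by
    cases W with
    | nil => simpa [hu] using hcb
    | cons w ws =>
      have : u.getD 0 ' ' = w := by simp [hu]
      rw [this]
      exact hW w (by simp)
  have hadj : ∀ i, i + 1 < u.length → u.getD (i + 1) ' ' ≤ u.getD i ' ' := by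
    intro i hi
    have h2 : i < u.length := by omega
    rw [List.getD_eq_getElem u ' ' hi, List.getD_eq_getElem u ' ' h2]
    exact List.pairwise_iff_getElem.mp hdesc i (i + 1) h2 hi (Nat.lt_succ_self i)
  have hk : kScan (c :: u) u.length = 1 := by
    apply kScan_eq_pos (c :: u) u.length 0 (by omega)
    · simpa using hu0
    · intro i h1 h2
      obtain ⟨i', rfl⟩ : ∃ i', i = i' + 1 := ⟨i - 1, by omega⟩
      rw [List.getD_cons_succ, List.getD_cons_succ]
      exact hadj i' (by omega)
  have hj : jScan (c :: u) c u.length = W.length + 1 := by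
    apply jScan_eq (c :: u) c u.length (W.length + 1) (by omega)
    · have : (c :: u).getD (W.length + 1) ' ' = b := by
        have h1 : (c :: u).getD (W.length + 1) ' ' = u.getD W.length ' ' := List.getD_cons_succ
        rw [h1, hu, getD_at]
      rw [this]
      exact hcb
    · intro i h1 h2
      obtain ⟨i', rfl⟩ : ∃ i', i = W.length + 1 + i' + 1 := ⟨i - W.length - 2, by omega⟩
      have he : (c :: u).getD (W.length + 1 + i' + 1) ' ' = T.getD i' ' ' := by
        rw [show W.length + 1 + i' + 1 = (W.length + 1 + i') + 1 by omega, List.getD_cons_succ]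
        rw [hu, getD_far]
      rw [he]
      have hi' : i' < T.length := by omega
      rw [List.getD_eq_getElem T ' ' hi']
      exact hT T[i'] (List.getElem_mem hi')
  simp only [nextP]
  rw [if_neg (by simp), hlen, hk, if_neg (Nat.one_ne_zero)]
  simp only [Nat.sub_self]
  have hgd0 : (c :: u).getD 0 ' ' = c := rfl
  rw [hgd0, hj]
  have hb : (c :: u).getD (W.length + 1) ' ' = b := by
    rw [List.getD_cons_succ, hu, getD_at]
  rw [hb]
  have hset : ((c :: u).set 0 b).set (W.length + 1) c = b :: (W ++ c :: T) := by
    show (b :: u).set (W.length + 1) c = b :: (W ++ c :: T)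
    rw [List.set_cons_succ, hu, setAt W T b c]
  rw [hset]
  simp [List.reverse_append]

theorem removeOne_cons_self (c : Char) (u : List Char) : removeOne (c :: u) c = u := by
  rw [removeOne, if_pos rfl]

theorem removeOne_sublist (l : List Char) (c : Char) : (removeOne l c).Sublist l := by
  induction l with
  | nil => simp [removeOne]
  | cons x xs ih =>
    rw [removeOne]
    split_ifs
    · exact (List.sublist_cons_self x xs)
    · exact List.Sublist.cons₂ x ih

theorem dedupF_go_mem_iff (l seen : List Char) (c : Char) :
    c ∈ l.foldl (fun seen c => if c ∈ seen then seen else seen ++ [c]) seen ↔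
      c ∈ seen ∨ c ∈ l := by
  induction l generalizing seen with
  | nil => simp
  | cons x xs ih =>
    simp only [List.foldl_cons]
    rw [ih]
    split_ifs with hx
    · constructor
      · rintro (h | h)
        · exact Or.inl h
        · simp [h]
      · rintro (h | h)
        · exact Or.inl h
        · rcases List.mem_cons.mp h with rfl | h
          · exact Or.inl hx
          · exact Or.inr h
    · simp only [List.mem_append, List.mem_singleton, List.mem_cons]
      tauto

theorem mem_dedupF_iff (l : List Char) (c : Char) : c ∈ dedupF l ↔ c ∈ l := by
  unfold dedupF
  rw [dedupF_go_mem_iff]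
  simp

theorem dedupF_go_pairwise (l seen : List Char) (hl : l.Pairwise (· ≤ ·))
    (hs : seen.Pairwise (· < ·)) (hall : ∀ x ∈ seen, ∀ y ∈ l, x ≤ y) :
    (l.foldl (fun seen c => if c ∈ seen then seen else seen ++ [c]) seen).Pairwise (· < ·) := by
  induction l generalizing seen with
  | nil => exact hs
  | cons x xs ih =>
    simp only [List.foldl_cons]
    rw [List.pairwise_cons] at hl
    obtain ⟨hx_le, hxs⟩ := hl
    split_ifs with hx
    · exact ih _ hxs hs (fun a ha y hy => hall a ha y (List.mem_cons_of_mem x hy))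
    · apply ih _ hxs
      · rw [List.pairwise_append]
        refine ⟨hs, by simp, ?_⟩
        intro a ha b hb
        simp only [List.mem_singleton] at hb
        subst hb
        have h1 : a ≤ b := hall a ha b (List.mem_cons_self)
        have h2 : a ≠ b := fun he => hx (he ▸ ha)
        exact lt_of_le_of_ne h1 h2
      · intro a ha y hy
        rcases List.mem_append.mp ha with ha | ha
        · exact hall a ha y (List.mem_cons_of_mem x hy)
        · simp only [List.mem_singleton] at ha
          subst ha
          exact hx_le y hy

theorem dedupF_pairwise (l : List Char) (hl : l.Pairwise (· ≤ ·)) :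
    (dedupF l).Pairwise (· < ·) := by
  exact dedupF_go_pairwise l [] hl (by simp) (by simp)

theorem gen_cons (chars : List Char) (h : chars ≠ []) :
    gen chars = (dedupF chars).flatMap (fun c => (gen (removeOne chars c)).map (c :: ·)) := by
  rw [gen, dif_neg h]
  conv_rhs => rw [← List.attach_map_subtype_val (dedupF chars)]
  rw [List.flatMap_map]

-- the last permutation visited from f
def lastC (f : List Char) : List Char := ((chain f).getLast?).getD []

theorem lastC_none (f : List Char) (h : nextP f = none) : lastC f = f := by
  rw [lastC, chain_none f h]; rfl

theorem lastC_some (f g : List Char) (h : nextP f = some g) : lastC f = lastC g := by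
  rw [lastC, lastC, chain_some f g h]
  congr 1
  have := chain_ne_nil g
  cases hc : chain g with
  | nil => exact absurd hc this
  | cons a t => rfl

theorem lastC_nextP (f : List Char) : nextP (lastC f) = none := by
  induction f using chain.induct with
  | case1 f h => rw [lastC_none f h]; exact h
  | case2 f g h ih => rw [lastC_some f g h]; exact ih

theorem lastC_mem (f : List Char) : lastC f ∈ chain f := by
  induction f using chain.induct with
  | case1 f h => rw [lastC_none f h, chain_none f h]; simp
  | case2 f g h ih =>
    rw [lastC_some f g h, chain_some f g h]
    exact List.mem_cons_of_mem f ih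

theorem lastC_perm (f : List Char) : (lastC f).Perm f := chain_perm f (lastC f) (lastC_mem f)

theorem lastC_desc (f : List Char) : (lastC f).Pairwise (fun x y => y ≤ x) :=
  desc_of_nextP_none (lastC f) (lastC_nextP f)

theorem perm_removeOne (l : List Char) (d : Char) (h : d ∈ l) :
    l.Perm (d :: removeOne l d) := by
  induction l with
  | nil => simp at h
  | cons x xs ih =>
    rw [removeOne]
    split_ifs with hx
    · subst hx; rfl
    · have hd : d ∈ xs := by
        rcases List.mem_cons.mp h with h1 | h1
        · exact absurd h1.symm hx
        · exact h1
      exact ((ih hd).cons x).trans (List.Perm.swap d x (removeOne xs d))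

theorem length_removeOne (l : List Char) (d : Char) (h : d ∈ l) :
    (removeOne l d).length + 1 = l.length := by
  have := (perm_removeOne l d h).length_eq
  simp at this
  omega

theorem nodup_dedupF (l : List Char) (hl : l.Pairwise (· ≤ ·)) : (dedupF l).Nodup :=
  (dedupF_pairwise l hl).imp ne_of_lt

theorem filter_singleton_of (L : List Char) (p : Char → Bool) (d : Char) (hnd : L.Nodup)
    (hd : d ∈ L) (huniq : ∀ x ∈ L, p x = true → x = d) (hpd : p d = true) :
    L.filter p = [d] := by
  induction L with
  | nil => simp at hd
  | cons a t ih =>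
    rw [List.nodup_cons] at hnd
    by_cases ha : a = d
    · subst ha
      rw [List.filter_cons_of_pos hpd]
      have : t.filter p = [] := by
        rw [List.filter_eq_nil_iff]
        intro x hx hpx
        exact absurd (huniq x (by simp [hx]) hpx) (fun he => hnd.1 (he ▸ hx))
      rw [this]
    · have hpa : p a = false := by
        rcases hb : p a with _ | _
        · rfl
        · exact absurd (huniq a (by simp) hb) ha
      rw [List.filter_cons_of_neg (by simp [hpa])]
      have hdt : d ∈ t := by
        rcases List.mem_cons.mp hd with h1 | h1
        · exact absurd h1.symm ha
        · exact h1
      exact ih hnd.2 hdt (fun x hx hpx => huniq x (by simp [hx]) hpx)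

theorem filter_le_cons_lt (L : List Char) (d : Char) (hL : L.Pairwise (· < ·)) (hd : d ∈ L) :
    L.filter (fun x => decide (d ≤ x)) = d :: L.filter (fun x => decide (d < x)) := by
  induction L with
  | nil => simp at hd
  | cons a t ih =>
    rw [List.pairwise_cons] at hL
    by_cases ha : a = d
    · subst ha
      rw [List.filter_cons_of_pos (by simp), List.filter_cons_of_neg (by simp)]
      congr 1
      apply List.filter_congr
      intro x hx
      have hx2 := hL.1 x hx
      simp [hx2, le_of_lt hx2]
    · have hdt : d ∈ t := by
        rcases List.mem_cons.mp hd with h1 | h1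
        · exact absurd h1.symm ha
        · exact h1
      have had : a < d := hL.1 d hdt
      rw [List.filter_cons_of_neg (by simp only [decide_eq_true_eq]; exact not_le_of_gt had),
        List.filter_cons_of_neg (by simp only [decide_eq_true_eq]; exact fun hc => (lt_asymm had) hc)]
      exact ih hL.2 hdt

theorem asc_unique (x y : List Char) (hp : x.Perm y) (hx : x.Pairwise (· ≤ ·))
    (hy : y.Pairwise (· ≤ ·)) : x = y :=
  List.Perm.eq_of_pairwise (fun a b _ _ h1 h2 => le_antisymm h1 h2) hx hy hp

theorem desc_unique (x y : List Char) (hp : x.Perm y) (hx : x.Pairwise (fun a b => b ≤ a))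
    (hy : y.Pairwise (fun a b => b ≤ a)) : x = y := by
  have hrx : x.reverse.Pairwise (· ≤ ·) := by
    rw [List.pairwise_reverse]; exact hx
  have hry : y.reverse.Pairwise (· ≤ ·) := by
    rw [List.pairwise_reverse]; exact hy
  have := asc_unique x.reverse y.reverse
    ((x.reverse_perm).trans (hp.trans (y.reverse_perm).symm)) hrx hry
  have h2 := congrArg List.reverse this
  simpa using h2

theorem lastC_eq_reverse (u : List Char) (hu : u.Pairwise (· ≤ ·)) : lastC u = u.reverse := by
  apply desc_unique
  · exact (lastC_perm u).trans (u.reverse_perm).symm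
  · exact lastC_desc u
  · rw [List.pairwise_reverse]; exact hu

-- chain of a block: walk the tail's chain under the fixed head, then jump
theorem chain_cons (c : Char) : ∀ u, u ≠ [] →
    chain (c :: u) = (chain u).map (c :: ·) ++
      (match nextP (c :: lastC u) with
       | none => []
       | some w => chain w) := by
  intro u
  induction u using chain.induct with
  | case1 u h =>
    intro hu
    rw [chain_none u h, lastC_none u h]
    rcases h2 : nextP (c :: u) with _ | w
    · rw [chain_none _ h2]; simp
    · rw [chain_some _ _ h2]; simp
  | case2 u g h ih =>
    intro hu
    have hg : g ≠ [] := by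
      intro h0; subst h0
      exact hu (nextP_perm u [] h).eq_nil
    rw [chain_some u g h, lastC_some u g h,
      chain_some (c :: u) (c :: g) (nextP_cons u g c h), List.map_cons, ih hg]
    rw [List.cons_append]

theorem lexLt_asymm (x y : List Char) (h : lexLt x y = true) : lexLt y x = false := by
  rcases hb : lexLt y x with _ | _
  · rfl
  · have := lexLt_trans x y x h hb
    rw [lexLt_irrefl] at this
    exact absurd this (by simp)

theorem countP_eq_idxOf (tgt : List Char) :
    ∀ L : List (List Char), L.Pairwise (fun x y => lexLt x y = true) → tgt ∈ L →
      L.countP (fun p => lexLt p tgt) = L.idxOf tgt := by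
  intro L
  induction L with
  | nil => intro _ hm; simp at hm
  | cons a t ih =>
    intro hpw hm
    rw [List.pairwise_cons] at hpw
    by_cases ha : a = tgt
    · subst ha
      rw [List.idxOf_cons_self, List.countP_cons, lexLt_irrefl]
      rw [List.countP_eq_zero.mpr (fun x hx => by
        simp only [Bool.not_eq_true]
        exact lexLt_asymm a x (hpw.1 x hx))]
      simp
    · have htm : tgt ∈ t := by
        rcases List.mem_cons.mp hm with h1 | h1
        · exact absurd h1.symm ha
        · exact h1
      rw [List.idxOf_cons_ne _ ha, List.countP_cons, hpw.1 tgt htm, ih hpw.2 htm]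
      simp

theorem foldl_count (tgt : List Char) :
    ∀ (L : List (List Char)) (z : Int),
      L.foldl (fun pos p => if lexLt p tgt then pos + 1 else pos) z =
        z + (L.countP (fun p => lexLt p tgt) : Int) := by
  intro L
  induction L with
  | nil => intro z; simp
  | cons a t ih =>
    intro z
    rw [List.foldl_cons, List.countP_cons, ih]
    by_cases ha : lexLt a tgt = true
    · rw [if_pos ha, if_pos ha]
      push_cast
      ring
    · rw [if_neg ha, if_neg ha]
      push_cast
      ring

theorem mem_gen : ∀ (t cs : List Char), t.Perm cs → t ∈ gen cs := by
  intro t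
  induction t with
  | nil =>
    intro cs hp
    have : cs = [] := hp.symm.eq_nil
    subst this
    rw [gen_nil]; simp
  | cons a t' ih =>
    intro cs hp
    have hcs : cs ≠ [] := by
      intro h0; subst h0
      exact absurd hp.eq_nil (by simp)
    have ha : a ∈ cs := hp.mem_iff.mp (by simp)
    rw [gen_cons cs hcs]
    rw [List.mem_flatMap]
    refine ⟨a, (mem_dedupF_iff cs a).mpr ha, ?_⟩
    rw [List.mem_map]
    refine ⟨t', ih (removeOne cs a) ?_, rfl⟩
    have h1 : cs.Perm (a :: removeOne cs a) := perm_removeOne cs a ha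
    exact (hp.trans h1).cons_inv

theorem ins_perm (l : List Char) (c : Char) : (insSorted l c).Perm (c :: l) := by
  induction l with
  | nil => rfl
  | cons x xs ih =>
    rw [insSorted]
    split_ifs
    · exact (ih.cons x).trans (List.Perm.swap c x xs)
    · rfl

theorem ins_pairwise (l : List Char) (c : Char) (h : l.Pairwise (· ≤ ·)) :
    (insSorted l c).Pairwise (· ≤ ·) := by
  induction l with
  | nil => simp [insSorted]
  | cons x xs ih =>
    rw [List.pairwise_cons] at h
    rw [insSorted]
    split_ifs with hxc
    · rw [List.pairwise_cons]
      refine ⟨?_, ih h.2⟩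
      intro y hy
      rcases List.mem_cons.mp ((ins_perm xs c).mem_iff.mp hy) with h1 | h1
      · subst h1; exact hxc
      · exact h.1 y h1
    · rw [List.pairwise_cons]
      have hcx : c ≤ x := le_of_not_ge hxc
      refine ⟨?_, List.pairwise_cons.mpr ⟨h.1, h.2⟩⟩
      intro y hy
      rcases List.mem_cons.mp hy with rfl | h1
      · exact hcx
      · exact le_trans hcx (h.1 y h1)

theorem sortchars_go (l : List Char) : ∀ acc, acc.Pairwise (· ≤ ·) →
    (l.foldl insSorted acc).Pairwise (· ≤ ·) ∧ (l.foldl insSorted acc).Perm (acc ++ l) := by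
  induction l with
  | nil => intro acc ha; exact ⟨ha, by simp⟩
  | cons x xs ih =>
    intro acc ha
    rw [List.foldl_cons]
    obtain ⟨h1, h2⟩ := ih (insSorted acc x) (ins_pairwise acc x ha)
    refine ⟨h1, ?_⟩
    have h3 : (insSorted acc x ++ xs).Perm ((x :: acc) ++ xs) :=
      (ins_perm acc x).append_right xs
    have h4 : ((x :: acc) ++ xs).Perm (acc ++ x :: xs) := List.perm_middle.symm
    exact (h2.trans h3).trans h4

theorem sortchars_pairwise (l : List Char) : (sortchars l).Pairwise (· ≤ ·) :=
  (sortchars_go l [] (by simp)).1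

theorem sortchars_perm (l : List Char) : (sortchars l).Perm l := by
  have := (sortchars_go l [] (by simp)).2
  simpa using this

theorem sortedA_eq (l : List Char) :
    PySem.List.sorted l (fun c => c) false = sortchars l := by
  apply asc_unique
  · exact (PySem.List.sorted_perm l (fun c => c) false).trans (sortchars_perm l).symm
  · have := PySem.List.sorted_pairwise l (fun c => c)
    simpa using this
  · exact sortchars_pairwise l

theorem nextP_nil : nextP [] = none := rfl

theorem dropWhile_head_false (p : Char → Bool) (v G' : List Char) (d' : Char)
    (h : v.dropWhile p = d' :: G') : p d' = false := by
  have h2 := List.head_dropWhile_not p (l := v) (by rw [h]; simp)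
  have h3 : (v.dropWhile p).head (by rw [h]; simp) = d' := by simp [h]
  rw [h3] at h2
  exact h2

-- the main theorem: the walk by repeated nextPermutation from a sorted list
-- is exactly the recursively generated list of distinct permutations
theorem chain_eq_gen : ∀ (n : Nat) (cs : List Char), cs.length ≤ n → cs.Pairwise (· ≤ ·) →
    chain cs = gen cs := by
  intro n
  induction n with
  | zero =>
    intro cs hlen _
    have hnil : cs = [] := by
      cases cs
      · rfl
      · simp at hlen
    subst hnil
    rw [chain_none [] nextP_nil, gen_nil]
  | succ n ihn =>
    intro cs hlen hsort
    cases cs with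
    | nil => rw [chain_none [] nextP_nil, gen_nil]
    | cons c u =>
      have BL : ∀ (k : Nat) (d : Char), d ∈ (c :: u) →
          (((dedupF (c :: u)).filter (fun x => decide (d ≤ x))).length ≤ k) →
          chain (d :: removeOne (c :: u) d) =
            ((dedupF (c :: u)).filter (fun x => decide (d ≤ x))).flatMap
              (fun e => (gen (removeOne (c :: u) e)).map (e :: ·)) := by
        intro k
        induction k with
        | zero =>
          intro d hd h0
          exfalso
          have hdm : d ∈ (dedupF (c :: u)).filter (fun x => decide (d ≤ x)) :=
            List.mem_filter.mpr ⟨(mem_dedupF_iff _ d).mpr hd, by simp⟩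
          have := List.length_pos_of_mem hdm
          omega
        | succ k ihk =>
          intro d hd hlenf
          have hveq : ((c :: u)).Perm (d :: removeOne (c :: u) d) := perm_removeOne _ d hd
          have hvsort : (removeOne (c :: u) d).Pairwise (· ≤ ·) :=
            hsort.sublist (removeOne_sublist _ d)
          have hvlen : (removeOne (c :: u) d).length + 1 = (c :: u).length :=
            length_removeOne _ d hd
          have hchainv : chain (removeOne (c :: u) d) = gen (removeOne (c :: u) d) := by
            apply ihn _ _ hvsort
            simp only [List.length_cons] at hlen hvlen
            omega
          by_cases hvne : removeOne (c :: u) d = []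
          · -- the one-character case
            have hlen1 : (c :: u).length = 1 := by rw [← hvlen, hvne]; rfl
            have hu0 : u = [] := by
              cases u
              · rfl
              · simp at hlen1
            subst hu0
            have hcd : c = d := by
              rcases List.mem_cons.mp hd with h1 | h1
              · exact h1.symm
              · simp at h1
            subst hcd
            rw [removeOne_cons_self]
            have hdF : dedupF [c] = [c] := rfl
            rw [hdF, chain_none [c] (nextP_none_of_desc [c] (by simp))]
            simp [removeOne_cons_self, gen_nil]
          · -- at least two characters in the block's tail
            rw [chain_cons d (removeOne (c :: u) d) hvne, lastC_eq_reverse _ hvsort]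
            set v := removeOne (c :: u) d with hvdef
            by_cases hex : ∃ x ∈ v, d < x
            · -- there is a later block: jump into it
              set F := v.takeWhile (fun x => decide (x ≤ d)) with hF
              set G := v.dropWhile (fun x => decide (x ≤ d)) with hG
              have hFG : F ++ G = v := List.takeWhile_append_dropWhile
              have hGne : G ≠ [] := by
                intro h0
                obtain ⟨x, hxv, hdx⟩ := hex
                have hxF : x ∈ F := by
                  have : v = F := by rw [← hFG, h0, List.append_nil]
                  rwa [this] at hxv
                have := List.mem_takeWhile_imp (hF ▸ hxF)
                simp at this
                exact absurd hdx (not_lt.mpr this)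
              obtain ⟨d', G', hG'⟩ : ∃ d' G', G = d' :: G' := by
                cases hGc : G with
                | nil => exact absurd hGc hGne
                | cons a t => exact ⟨a, t, rfl⟩
              have hGsort : G.Pairwise (· ≤ ·) := hvsort.sublist (hG ▸ List.dropWhile_sublist _)
              have hFsort : F.Pairwise (· ≤ ·) := hvsort.sublist (hF ▸ List.takeWhile_sublist _)
              have hdd' : d < d' := by
                have := dropWhile_head_false (fun x => decide (x ≤ d)) v G' d' (hG ▸ hG')
                simp at this
                exact this
              have hF_le : ∀ x ∈ F, x ≤ d := by
                intro x hx
                have := List.mem_takeWhile_imp (hF ▸ hx)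
                simpa using this
              have hG'_ge : ∀ x ∈ G', d' ≤ x := (List.pairwise_cons.mp (hG' ▸ hGsort)).1
              have hG'sort : G'.Pairwise (· ≤ ·) := (List.pairwise_cons.mp (hG' ▸ hGsort)).2
              have hvrev : v.reverse = G'.reverse ++ d' :: F.reverse := by
                rw [← hFG, hG']
                simp
              rw [hvrev]
              rw [nextP_block d d' G'.reverse F.reverse hdd'
                (by intro x hx; simp only [List.mem_reverse] at hx
                    exact lt_of_lt_of_le hdd' (hG'_ge x hx))
                (by intro x hx; simp only [List.mem_reverse] at hx
                    exact hF_le x hx)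
                (by rw [← hvrev, List.pairwise_reverse]
                    exact hvsort)]
              simp only [List.reverse_reverse]
              have hd'v : d' ∈ v := by
                rw [← hFG, hG']
                simp
              have hd'cs : d' ∈ (c :: u) := (removeOne_sublist _ d).subset hd'v
              have hsorted2 : (F ++ d :: G').Pairwise (· ≤ ·) := by
                rw [List.pairwise_append]
                refine ⟨hFsort, ?_, ?_⟩
                · rw [List.pairwise_cons]
                  exact ⟨fun x hx => le_trans (le_of_lt hdd') (hG'_ge x hx), hG'sort⟩
                · intro x hx y hy
                  rcases List.mem_cons.mp hy with rfl | hy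
                  · exact hF_le x hx
                  · exact le_trans (hF_le x hx) (le_trans (le_of_lt hdd') (hG'_ge y hy))
              have hperm2 : (removeOne (c :: u) d').Perm (F ++ d :: G') := by
                have h1 : (c :: u).Perm (d' :: removeOne (c :: u) d') :=
                  perm_removeOne _ d' hd'cs
                have h2 : (d :: v).Perm (d' :: (F ++ d :: G')) := by
                  rw [← hFG, hG']
                  rw [List.perm_iff_count]
                  intro x
                  simp only [List.count_cons, List.count_append]
                  split_ifs <;> omega
                exact (h1.symm.trans (hveq.trans h2)).cons_inv
              have heq2 : removeOne (c :: u) d' = F ++ d :: G' :=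
                asc_unique _ _ hperm2 (hsort.sublist (removeOne_sublist _ d')) hsorted2
              rw [← heq2]
              have hfiltereq : (dedupF (c :: u)).filter (fun x => decide (d ≤ x)) =
                  d :: (dedupF (c :: u)).filter (fun x => decide (d' ≤ x)) := by
                rw [filter_le_cons_lt _ d (dedupF_pairwise _ hsort)
                  ((mem_dedupF_iff _ d).mpr hd)]
                congr 1
                apply List.filter_congr
                intro x hx
                have hxcs : x ∈ (c :: u) := (mem_dedupF_iff _ x).mp hx
                simp only [decide_eq_decide]
                constructor
                · intro hdx
                  have hxdv : x ∈ d :: v := hveq.mem_iff.mp hxcs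
                  have hxv : x ∈ v := by
                    rcases List.mem_cons.mp hxdv with rfl | h1
                    · exact absurd hdx (lt_irrefl x)
                    · exact h1
                  rw [← hFG] at hxv
                  rcases List.mem_append.mp hxv with h1 | h1
                  · exact absurd hdx (not_lt.mpr (hF_le x h1))
                  · rcases List.mem_cons.mp (hG' ▸ h1) with rfl | h2
                    · exact le_refl x
                    · exact hG'_ge x h2
                · intro hd'x
                  exact lt_of_lt_of_le hdd' hd'x
              rw [hfiltereq, List.flatMap_cons]
              congr 1
              · rw [hchainv]
              · apply ihk d' hd'cs
                rw [hfiltereq] at hlenf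
                simp only [List.length_cons] at hlenf
                omega
            · -- d's block is the last one
              have hall : ∀ x ∈ v, x ≤ d := by
                intro x hx
                by_contra hc
                exact hex ⟨x, hx, lt_of_not_ge hc⟩
              have hdesc2 : (d :: v.reverse).Pairwise (fun a b => b ≤ a) := by
                rw [List.pairwise_cons]
                refine ⟨fun x hx => hall x (List.mem_reverse.mp hx), ?_⟩
                rw [List.pairwise_reverse]
                exact hvsort
              rw [nextP_none_of_desc _ hdesc2]
              have hfilter1 : (dedupF (c :: u)).filter (fun x => decide (d ≤ x)) = [d] := by
                apply filter_singleton_of _ _ d (nodup_dedupF _ hsort)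
                  ((mem_dedupF_iff _ d).mpr hd)
                · intro x hx hpx
                  simp only [decide_eq_true_eq] at hpx
                  have hxcs : x ∈ (c :: u) := (mem_dedupF_iff _ x).mp hx
                  have hxdv : x ∈ d :: v := hveq.mem_iff.mp hxcs
                  rcases List.mem_cons.mp hxdv with rfl | h1
                  · rfl
                  · exact le_antisymm (hall x h1) hpx
                · simp
              rw [hfilter1]
              simp only [List.flatMap_cons, List.flatMap_nil, List.append_nil]
              rw [hchainv]
      have hc0 : c ∈ (c :: u) := by simp
      have hmain := BL ((dedupF (c :: u)).filter (fun x => decide (c ≤ x))).length c hc0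
        (le_refl _)
      rw [removeOne_cons_self] at hmain
      have hfullfilter : (dedupF (c :: u)).filter (fun x => decide (c ≤ x)) = dedupF (c :: u) := by
        apply List.filter_eq_self.mpr
        intro x hx
        have hxcs : x ∈ (c :: u) := (mem_dedupF_iff _ x).mp hx
        simp only [decide_eq_true_eq]
        rcases List.mem_cons.mp hxcs with rfl | h1
        · exact le_refl x
        · exact (List.pairwise_cons.mp hsort).1 x h1
      rw [hfullfilter] at hmain
      rw [hmain, gen_cons (c :: u) (by simp)]

-- ===== VERDICT (by name: the statement is the Claim_ definition above) =====
theorem findPosition_spec : Claim_equal_findPosition := by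
  intro s _ _
  unfold Spec_findPosition
  show findPosition s = findPosition_alt s
  unfold findPosition findPosition_alt
  rw [sortedA_eq]
  have hsorted : (sortchars s.toList).Pairwise (· ≤ ·) := sortchars_pairwise s.toList
  have hchain : chain (sortchars s.toList) = gen (sortchars s.toList) :=
    chain_eq_gen (sortchars s.toList).length _ (le_refl _) hsorted
  rw [loopA_chain, hchain]
  have hmem : s.toList ∈ gen (sortchars s.toList) :=
    mem_gen s.toList (sortchars s.toList) (sortchars_perm s.toList).symm
  rw [if_pos hmem]
  have hpw : (gen (sortchars s.toList)).Pairwise (fun x y => lexLt x y = true) :=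
    hchain ▸ chain_pairwise (sortchars s.toList)
  show _ = (List.foldl (fun pos p => if lexLt p s.toList = true then pos + 1 else pos) 0
      (gen (sortchars s.toList)), ((gen (sortchars s.toList)).length : Int))
  rw [foldl_count, countP_eq_idxOf s.toList (gen (sortchars s.toList)) hpw hmem]
  simp
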